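-- pv_equiv track=rewrite | github.com/mmmmosca/theta-lang | theta.py | transform_semicolons_in_brackets
-- ===== SOURCE A (Python) =====
-- def transform_semicolons_in_brackets(s: str) -> str:
--     """Convert semicolon-separated lists inside square brackets to comma-separated.
--
--     Example: '[1;2;3]' -> '[1,2,3]'. Handles nested brackets and respects quotes.
--     """
--     out = []
--     depth = 0
--     in_sq = False
--     in_dq = False
--     i = 0
--     while i < len(s):
--         ch = s[i]
--         if ch == "'" and not in_dq:
--             in_sq = not in_sq
--             out.append(ch)
--         elif ch == '"' and not in_sq:
--             in_dq = not in_dq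
--             out.append(ch)
--         elif not in_sq and not in_dq:
--             if ch == '[':
--                 depth += 1
--                 out.append(ch)
--             elif ch == ']':
--                 depth -= 1
--                 out.append(ch)
--             elif ch == ';' and depth > 0:
--                 out.append(',')
--             else:
--                 out.append(ch)
--         else:
--             out.append(ch)
--         i += 1
--     return ''.join(out)
-- ===== SOURCE B (Python) =====
-- def transform_semicolons_in_brackets(s: str) -> str:
--     """Convert semicolon-separated lists inside square brackets to comma-separated.
--
--     Chunked scan: quoted literals are copied wholesale via str.find; outside
--     quotes a bracket depth decides whether ';' becomes ','.
--     """
--     out = []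
--     depth = 0
--     i = 0
--     n = len(s)
--     while i < n:
--         ch = s[i]
--         if ch == "'" or ch == '"':
--             j = s.find(ch, i + 1)
--             if j == -1:
--                 out.append(s[i:])
--                 break
--             out.append(s[i:j + 1])
--             i = j + 1
--         else:
--             if ch == '[':
--                 depth += 1
--                 out.append(ch)
--             elif ch == ']':
--                 depth -= 1
--                 out.append(ch)
--             elif ch == ';' and depth > 0:
--                 out.append(',')
--             else:
--                 out.append(ch)
--             i += 1
--     return ''.join(out)
-- ===== Notes on version B (the rewrite author's own statement) =====
-- stated objective: alternative
-- what changed: Replaced the per-character quote-flag state machine (in_sq/in_dq toggles on every char) by a chunked scan that copies each quoted literal wholesale with str.find and only tracks bracket depth outside quotes.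
import Mathlib
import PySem

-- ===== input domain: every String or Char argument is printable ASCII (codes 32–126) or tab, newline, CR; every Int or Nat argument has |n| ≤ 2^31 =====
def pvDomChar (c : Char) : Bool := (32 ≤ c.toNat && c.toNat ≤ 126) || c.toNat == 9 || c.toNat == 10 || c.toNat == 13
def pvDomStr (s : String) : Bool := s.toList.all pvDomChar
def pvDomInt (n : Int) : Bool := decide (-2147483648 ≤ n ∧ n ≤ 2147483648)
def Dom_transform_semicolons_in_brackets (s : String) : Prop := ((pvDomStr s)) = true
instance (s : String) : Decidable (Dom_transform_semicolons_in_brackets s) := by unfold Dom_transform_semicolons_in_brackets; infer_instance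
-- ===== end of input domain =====

-- B replaces the per-character quote-flag toggling by a chunked scan that copies each
-- quoted literal wholesale (alternative decomposition, same cost).


-- ===== PORT A =====
-- while-loop over the characters of s with state (depth, in_sq, in_dq), appending to out
def goA_transform : List Char → Int → Bool → Bool → List Char
  | [], _, _, _ => []
  | ch :: rest, depth, in_sq, in_dq =>
    if ch = '\'' ∧ ¬ in_dq then
      ch :: goA_transform rest depth (!in_sq) in_dq
    else if ch = '"' ∧ ¬ in_sq then
      ch :: goA_transform rest depth in_sq (!in_dq)
    else if ¬ in_sq ∧ ¬ in_dq then
      if ch = '[' then ch :: goA_transform rest (depth + 1) in_sq in_dq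
      else if ch = ']' then ch :: goA_transform rest (depth - 1) in_sq in_dq
      else if ch = ';' ∧ depth > 0 then ',' :: goA_transform rest depth in_sq in_dq
      else ch :: goA_transform rest depth in_sq in_dq
    else
      ch :: goA_transform rest depth in_sq in_dq

def transform_semicolons_in_brackets (s : String) : String :=
  String.mk (goA_transform s.toList 0 false false)

-- ===== PORT B =====
-- chunked scan: on a quote char, copy up to (and including) the matching quote at once
-- (Python's s.find(ch, i+1) is ported as takeWhile/dropWhile on the remaining chars);
-- outside quotes only the bracket depth is tracked
def goB_transform : List Char → Int → List Char
  | [], _ => []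
  | ch :: rest, depth =>
    if ch = '\'' ∨ ch = '"' then
      match h : rest.dropWhile (· ≠ ch) with
      | [] => ch :: rest            -- no closing quote: copy the remainder and stop
      | c :: rest' =>
        ch :: (rest.takeWhile (· ≠ ch) ++ c :: goB_transform rest' depth)
    else if ch = '[' then ch :: goB_transform rest (depth + 1)
    else if ch = ']' then ch :: goB_transform rest (depth - 1)
    else if ch = ';' ∧ depth > 0 then ',' :: goB_transform rest depth
    else ch :: goB_transform rest depth
termination_by l _ => l.length
decreasing_by
  all_goals simp_wf
  · have h1 : (rest.dropWhile (· ≠ ch)).length ≤ rest.length := rest.length_dropWhile_le _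
    rw [h] at h1; simp at h1; omega
  all_goals omega

def transform_semicolons_in_brackets_alt (s : String) : String :=
  String.mk (goB_transform s.toList 0)

-- ===== PRECONDITION & SPEC =====
def Spec_transform_semicolons_in_brackets (s : String) (out : String) : Prop := out = transform_semicolons_in_brackets_alt s
instance (s : String) (out : String) : Decidable (Spec_transform_semicolons_in_brackets s out) := by unfold Spec_transform_semicolons_in_brackets; infer_instance

-- ===== CLAIM (what is proved, stated in full; the proofs are below) =====
def Claim_equal_transform_semicolons_in_brackets : Prop := ∀ (s : String), Dom_transform_semicolons_in_brackets s → Spec_transform_semicolons_in_brackets s (transform_semicolons_in_brackets s)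

-- ===== LEMMAS AND PROOFS =====

-- While a quote is open with quote char q, A copies every char verbatim until the next q,
-- which closes the quote.
theorem goA_in_sq (l : List Char) (depth : Int) :
    goA_transform l depth true false =
      l.takeWhile (· ≠ '\'') ++
        (match l.dropWhile (· ≠ '\'') with
         | [] => []
         | c :: rest => c :: goA_transform rest depth false false) := by
  induction l with
  | nil => simp [goA_transform]
  | cons c rest ih =>
    by_cases hc : c = '\''
    · subst hc; simp [goA_transform, List.takeWhile, List.dropWhile]
    · simp [goA_transform, hc, List.takeWhile, List.dropWhile, ih]

theorem goA_in_dq (l : List Char) (depth : Int) :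
    goA_transform l depth false true =
      l.takeWhile (· ≠ '"') ++
        (match l.dropWhile (· ≠ '"') with
         | [] => []
         | c :: rest => c :: goA_transform rest depth false false) := by
  induction l with
  | nil => simp [goA_transform]
  | cons c rest ih =>
    by_cases hc : c = '"'
    · subst hc; simp [goA_transform, List.takeWhile, List.dropWhile]
    · simp [goA_transform, hc, List.takeWhile, List.dropWhile, ih]

theorem goA_eq_goB : ∀ (n : Nat) (l : List Char) (depth : Int), l.length ≤ n →
    goA_transform l depth false false = goB_transform l depth := by
  intro n
  induction n with
  | zero =>
    intro l depth hl
    have : l = [] := by cases l <;> simp_all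
    subst this; simp [goA_transform, goB_transform]
  | succ n ih =>
    intro l depth hl
    cases l with
    | nil => simp [goA_transform, goB_transform]
    | cons ch rest =>
      simp only [List.length_cons] at hl
      by_cases hq : ch = '\'' ∨ ch = '"'
      · have hcopy :
            goA_transform (ch :: rest) depth false false =
              ch :: (rest.takeWhile (· ≠ ch) ++
                (match rest.dropWhile (· ≠ ch) with
                 | [] => []
                 | c :: rest' => c :: goA_transform rest' depth false false)) := by
          rcases hq with h | h <;> subst h
          · simp [goA_transform, goA_in_sq]
          · simp [goA_transform, goA_in_dq]
        rw [hcopy]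
        cases hdrop : rest.dropWhile (· ≠ ch) with
        | nil =>
          have htake : rest.takeWhile (· ≠ ch) = rest := by
            have := List.takeWhile_append_dropWhile (p := (· ≠ ch)) (l := rest)
            rw [hdrop] at this; simpa using this
          rw [goB_transform]
          simp only [hq, if_true, or_true, true_or]
          simp only [ne_eq] at hdrop ⊢
          split
          · simp only [ne_eq] at htake ⊢
            rw [htake]
            simp
          · rename_i c rest' h
            rw [hdrop] at h
            exact absurd h (by simp)
        | cons c rest' =>
          have hlen : (rest.dropWhile (· ≠ ch)).length ≤ rest.length :=
            rest.length_dropWhile_le _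
          rw [hdrop] at hlen; simp only [List.length_cons] at hlen
          have := ih rest' depth (by omega)
          rw [goB_transform]
          simp only [hq, if_true, or_true, true_or]
          simp only [ne_eq] at hdrop ⊢
          split
          · rename_i h
            rw [hdrop] at h
            exact absurd h (by simp)
          · rename_i c2 rest2 h
            rw [hdrop] at h
            obtain ⟨rfl, rfl⟩ := by simpa using h
            simp [this]
      · push_neg at hq
        obtain ⟨h1, h2⟩ := hq
        have ihrest : ∀ d : Int, goA_transform rest d false false = goB_transform rest d :=
          fun d => ih rest d (by omega)
        by_cases hb : ch = '['
        · subst hb; simp [goA_transform, goB_transform, ihrest]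
        · by_cases hb2 : ch = ']'
          · subst hb2; simp [goA_transform, goB_transform, ihrest]
          · by_cases hb3 : ch = ';' ∧ depth > 0
            · simp [goA_transform, goB_transform, h1, h2, hb, hb2, hb3, ihrest]
            · simp [goA_transform, goB_transform, h1, h2, hb, hb2, hb3, ihrest]

-- ===== VERDICT (by name: the statement is the Claim_ definition above) =====
theorem transform_semicolons_in_brackets_spec : Claim_equal_transform_semicolons_in_brackets := by
  intro s _
  unfold Spec_transform_semicolons_in_brackets transform_semicolons_in_brackets
    transform_semicolons_in_brackets_alt
  rw [goA_eq_goB s.toList.length s.toList 0 le_rfl]
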